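-- pv_equiv track=rewrite | github.com/bksubhuti/tpr_downloads | epitaka/build_tpr_full_en.py | render_inline
-- ===== SOURCE A (Python) =====
-- def render_inline(text: str) -> str:
--     result, i = [], 0
--     while i < len(text):
--         if text[i] == '`':
--             end = text.find('`', i + 1)
--             if end != -1:
--                 result.append(f'<span class="paranum">{text[i+1:end]}</span>')
--                 i = end + 1; continue
--         if text[i:i+2] == '**':
--             end = text.find('**', i + 2)
--             if end != -1:
--                 result.append(f'<span class="bld">{text[i+2:end]}</span>')
--                 i = end + 2; continue
--         if text[i:i+2] == r'\[':
--             end = text.find(r'\]', i + 2)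
--             if end != -1:
--                 result.append(f'<span class="note">[{text[i+2:end]}]</span>')
--                 i = end + 2; continue
--         if text[i] == '[':
--             end = text.find(']', i + 1)
--             if end != -1:
--                 result.append(f'<span class="note">[{text[i+1:end]}]</span>')
--                 i = end + 1; continue
--         result.append(text[i]); i += 1
--     return "".join(result)
-- ===== SOURCE B (Python) =====
-- def render_inline(text: str) -> str:
--     # One backward pass precomputes, for every position, the next occurrence of
--     # each closing delimiter; the forward pass then uses table lookups instead of
--     # rescanning the tail with str.find.
--     n = len(text)
--     nxt = [(-1, -1, -1, -1)]          # entry k (after reversal) = next occurrence at >= k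
--     for j in range(n - 1, -1, -1):
--         bt, b2, ne, rb = nxt[-1]
--         two = text[j:j + 2]
--         nxt.append((j if text[j] == '`' else bt,
--                     j if two == '**' else b2,
--                     j if two == '\\]' else ne,
--                     j if text[j] == ']' else rb))
--     nxt.reverse()
--     out = []
--     i = 0
--     while i < n:
--         c = text[i]
--         if c == '`':
--             end = nxt[i + 1][0]
--             if end != -1:
--                 out.append(f'<span class="paranum">{text[i+1:end]}</span>')
--                 i = end + 1
--                 continue
--         two = text[i:i + 2]
--         if two == '**':
--             end = nxt[i + 2][1]
--             if end != -1:
--                 out.append(f'<span class="bld">{text[i+2:end]}</span>')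
--                 i = end + 2
--                 continue
--         if two == '\\[':
--             end = nxt[i + 2][2]
--             if end != -1:
--                 out.append(f'<span class="note">[{text[i+2:end]}]</span>')
--                 i = end + 2
--                 continue
--         if c == '[':
--             end = nxt[i + 1][3]
--             if end != -1:
--                 out.append(f'<span class="note">[{text[i+1:end]}]</span>')
--                 i = end + 1
--                 continue
--         out.append(c)
--         i += 1
--     return "".join(out)
-- ===== Notes on version B (the rewrite author's own statement) =====
-- stated objective: alternative
-- what changed: Instead of calling str.find on the remaining text at every delimiter, B makes one backward pass that precomputes, for every position, the next occurrence of each of the four closing delimiters, and the forward pass then uses constant-time table lookups.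
import Mathlib
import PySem

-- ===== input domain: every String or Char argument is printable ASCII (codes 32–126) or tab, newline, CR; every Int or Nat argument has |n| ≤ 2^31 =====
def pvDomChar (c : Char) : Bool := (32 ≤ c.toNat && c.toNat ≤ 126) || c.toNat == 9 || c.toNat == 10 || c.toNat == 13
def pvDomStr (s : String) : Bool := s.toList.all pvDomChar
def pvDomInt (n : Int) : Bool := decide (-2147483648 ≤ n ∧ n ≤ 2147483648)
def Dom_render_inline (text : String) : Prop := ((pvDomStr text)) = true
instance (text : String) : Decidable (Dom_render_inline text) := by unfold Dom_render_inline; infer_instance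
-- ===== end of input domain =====

-- B replaces A's repeated str.find rescans by one backward pass that precomputes, for every
-- position, the next occurrence of each closing delimiter; the forward pass then does table lookups
-- (objective: alternative algorithm; not measured faster on the generated inputs).

-- ===== PORT A =====
-- A's while loop, ported with fuel = remaining length (each iteration advances i by ≥ 1).
def pvGoA (cs : List Char) : Nat → Nat → List Char
  | 0, _ => []
  | fuel + 1, i =>
    if hi : i < cs.length then
      if cs[i]'hi = '`' ∧ PySem.Chars.findFrom cs ['`'] ↑(i + 1) ≠ -1 then
        "<span class=\"paranum\">".toList
          ++ PySem.Chars.slice cs (some ↑(i + 1)) (some (PySem.Chars.findFrom cs ['`'] ↑(i + 1)))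
          ++ "</span>".toList
          ++ pvGoA cs fuel (PySem.Chars.findFrom cs ['`'] ↑(i + 1) + 1).toNat
      else if PySem.Chars.slice cs (some ↑i) (some ↑(i + 2)) = ['*', '*']
          ∧ PySem.Chars.findFrom cs ['*', '*'] ↑(i + 2) ≠ -1 then
        "<span class=\"bld\">".toList
          ++ PySem.Chars.slice cs (some ↑(i + 2)) (some (PySem.Chars.findFrom cs ['*', '*'] ↑(i + 2)))
          ++ "</span>".toList
          ++ pvGoA cs fuel (PySem.Chars.findFrom cs ['*', '*'] ↑(i + 2) + 2).toNat
      else if PySem.Chars.slice cs (some ↑i) (some ↑(i + 2)) = ['\\', '[']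
          ∧ PySem.Chars.findFrom cs ['\\', ']'] ↑(i + 2) ≠ -1 then
        "<span class=\"note\">[".toList
          ++ PySem.Chars.slice cs (some ↑(i + 2)) (some (PySem.Chars.findFrom cs ['\\', ']'] ↑(i + 2)))
          ++ "]</span>".toList
          ++ pvGoA cs fuel (PySem.Chars.findFrom cs ['\\', ']'] ↑(i + 2) + 2).toNat
      else if cs[i]'hi = '[' ∧ PySem.Chars.findFrom cs [']'] ↑(i + 1) ≠ -1 then
        "<span class=\"note\">[".toList
          ++ PySem.Chars.slice cs (some ↑(i + 1)) (some (PySem.Chars.findFrom cs [']'] ↑(i + 1)))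
          ++ "]</span>".toList
          ++ pvGoA cs fuel (PySem.Chars.findFrom cs [']'] ↑(i + 1) + 1).toNat
      else (cs[i]'hi) :: pvGoA cs fuel (i + 1)
    else []

def render_inline (text : String) : String :=
  String.ofList (pvGoA text.toList text.toList.length 0)

-- ===== PORT B =====
-- Backward pass: entry k = (next '`', next '**', next '\]', next ']') at position ≥ k.
def pvNext : List Char → Int → List (Int × Int × Int × Int)
  | [], _ => [(-1, -1, -1, -1)]
  | c :: rest, j =>
    let tail := pvNext rest (j + 1)
    let p := tail.getD 0 (-1, -1, -1, -1)
    let two := List.take 2 (c :: rest)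
    (if c = '`' then j else p.1,
     if two = ['*', '*'] then j else p.2.1,
     if two = ['\\', ']'] then j else p.2.2.1,
     if c = ']' then j else p.2.2.2) :: tail

-- Forward pass: table lookups instead of str.find.
def pvGoB (cs : List Char) (nx : List (Int × Int × Int × Int)) : Nat → Nat → List Char
  | 0, _ => []
  | fuel + 1, i =>
    if hi : i < cs.length then
      if cs[i]'hi = '`' ∧ (nx.getD (i + 1) (-1, -1, -1, -1)).1 ≠ -1 then
        "<span class=\"paranum\">".toList
          ++ PySem.Chars.slice cs (some ↑(i + 1)) (some (nx.getD (i + 1) (-1, -1, -1, -1)).1)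
          ++ "</span>".toList
          ++ pvGoB cs nx fuel ((nx.getD (i + 1) (-1, -1, -1, -1)).1 + 1).toNat
      else if PySem.Chars.slice cs (some ↑i) (some ↑(i + 2)) = ['*', '*']
          ∧ (nx.getD (i + 2) (-1, -1, -1, -1)).2.1 ≠ -1 then
        "<span class=\"bld\">".toList
          ++ PySem.Chars.slice cs (some ↑(i + 2)) (some (nx.getD (i + 2) (-1, -1, -1, -1)).2.1)
          ++ "</span>".toList
          ++ pvGoB cs nx fuel ((nx.getD (i + 2) (-1, -1, -1, -1)).2.1 + 2).toNat
      else if PySem.Chars.slice cs (some ↑i) (some ↑(i + 2)) = ['\\', '[']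
          ∧ (nx.getD (i + 2) (-1, -1, -1, -1)).2.2.1 ≠ -1 then
        "<span class=\"note\">[".toList
          ++ PySem.Chars.slice cs (some ↑(i + 2)) (some (nx.getD (i + 2) (-1, -1, -1, -1)).2.2.1)
          ++ "]</span>".toList
          ++ pvGoB cs nx fuel ((nx.getD (i + 2) (-1, -1, -1, -1)).2.2.1 + 2).toNat
      else if cs[i]'hi = '[' ∧ (nx.getD (i + 1) (-1, -1, -1, -1)).2.2.2 ≠ -1 then
        "<span class=\"note\">[".toList
          ++ PySem.Chars.slice cs (some ↑(i + 1)) (some (nx.getD (i + 1) (-1, -1, -1, -1)).2.2.2)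
          ++ "]</span>".toList
          ++ pvGoB cs nx fuel ((nx.getD (i + 1) (-1, -1, -1, -1)).2.2.2 + 1).toNat
      else (cs[i]'hi) :: pvGoB cs nx fuel (i + 1)
    else []

def render_inline_alt (text : String) : String :=
  String.ofList (pvGoB text.toList (pvNext text.toList 0) text.toList.length 0)

-- ===== PRECONDITION & SPEC =====
def Spec_render_inline (text : String) (out : String) : Prop := out = render_inline_alt text
instance (text : String) (out : String) : Decidable (Spec_render_inline text out) := by unfold Spec_render_inline; infer_instance

-- ===== CLAIM (what is proved, stated in full; the proofs are below) =====
def Claim_equal_render_inline : Prop := ∀ (text : String), Dom_render_inline text → Spec_render_inline text (render_inline text)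

-- ===== LEMMAS AND PROOFS =====

-- find points at the first occurrence, hence is determined by its spec.
lemma pvFind_eq_of (s sub : List Char) (m : Nat) (h1 : sub <+: s.drop m)
    (h2 : ∀ i < m, ¬ sub <+: s.drop i) : PySem.Chars.find s sub = ↑m := by
  have hinf : sub <:+: s := h1.isInfix.trans (List.drop_suffix m s).isInfix
  have h0 : 0 ≤ PySem.Chars.find s sub := (PySem.Chars.find_nonneg_iff s sub).2 hinf
  obtain ⟨hp, hmin⟩ := PySem.Chars.find_spec h0
  have hm : (PySem.Chars.find s sub).toNat = m := by
    rcases lt_trichotomy (PySem.Chars.find s sub).toNat m with h | h | h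
    · exact absurd hp (h2 _ h)
    · exact h
    · exact absurd h1 (hmin m h)
  omega

-- cons-unfolding of find, derived from the spec lemmas.
lemma pvFind_cons (c : Char) (rest sub : List Char) :
    PySem.Chars.find (c :: rest) sub =
      if sub <+: c :: rest then 0
      else if PySem.Chars.find rest sub = -1 then -1 else 1 + PySem.Chars.find rest sub := by
  split_ifs with hp hn
  · exact pvFind_eq_of _ _ 0 (by simpa using hp) (by omega)
  · rw [PySem.Chars.find_eq_neg_one_iff] at hn ⊢
    intro hinf
    rcases List.infix_cons_iff.1 hinf with h | h
    · exact hp h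
    · exact hn h
  · have h0 : 0 ≤ PySem.Chars.find rest sub := by
      have := PySem.Chars.neg_one_le_find rest sub; omega
    obtain ⟨hp2, hmin2⟩ := PySem.Chars.find_spec h0
    have key : PySem.Chars.find (c :: rest) sub = ↑(1 + (PySem.Chars.find rest sub).toNat) := by
      apply pvFind_eq_of
      · rw [Nat.add_comm, List.drop_succ_cons]; exact hp2
      · intro i hilt
        cases i with
        | zero => simpa using hp
        | succ i' =>
          rw [List.drop_succ_cons]
          exact hmin2 i' (by omega)
    rw [key]; push_cast; omega

lemma pvNext_getD (cs : List Char) (j : Int) (k : Nat) (hk : k ≤ cs.length) :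
    (pvNext cs j).getD k (-1, -1, -1, -1) =
      ((if PySem.Chars.find (cs.drop k) ['`'] = -1 then -1
          else j + ↑k + PySem.Chars.find (cs.drop k) ['`']),
       (if PySem.Chars.find (cs.drop k) ['*', '*'] = -1 then -1
          else j + ↑k + PySem.Chars.find (cs.drop k) ['*', '*']),
       (if PySem.Chars.find (cs.drop k) ['\\', ']'] = -1 then -1
          else j + ↑k + PySem.Chars.find (cs.drop k) ['\\', ']']),
       (if PySem.Chars.find (cs.drop k) [']'] = -1 then -1
          else j + ↑k + PySem.Chars.find (cs.drop k) [']'])) := by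
  induction cs generalizing j k with
  | nil =>
    have hk0 : k = 0 := by simpa using hk
    subst hk0
    have h1 : PySem.Chars.find ([] : List Char) ['`'] = -1 := by decide
    have h2 : PySem.Chars.find ([] : List Char) ['*', '*'] = -1 := by decide
    have h3 : PySem.Chars.find ([] : List Char) ['\\', ']'] = -1 := by decide
    have h4 : PySem.Chars.find ([] : List Char) [']'] = -1 := by decide
    simp [pvNext, h1, h2, h3, h4]
  | cons c rest ih =>
    cases k with
    | zero =>
      have htail := ih (j + 1) 0 (by omega)
      simp only [List.drop_zero] at htail ⊢
      simp only [pvNext, List.getD_cons_zero, htail]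
      have e1 : (['`'] <+: c :: rest) ↔ c = '`' := by
        simp [List.cons_prefix_cons, eq_comm]
      have e2 : (['*', '*'] <+: c :: rest) ↔ List.take 2 (c :: rest) = ['*', '*'] := by
        rw [List.prefix_iff_eq_take]; constructor <;> (intro h; exact h.symm)
      have e3 : (['\\', ']'] <+: c :: rest) ↔ List.take 2 (c :: rest) = ['\\', ']'] := by
        rw [List.prefix_iff_eq_take]; constructor <;> (intro h; exact h.symm)
      have e4 : ([']'] <+: c :: rest) ↔ c = ']' := by
        simp [List.cons_prefix_cons, eq_comm]
      have n1 := PySem.Chars.neg_one_le_find rest ['`']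
      have n2 := PySem.Chars.neg_one_le_find rest ['*', '*']
      have n3 := PySem.Chars.neg_one_le_find rest ['\\', ']']
      have n4 := PySem.Chars.neg_one_le_find rest [']']
      simp only [pvFind_cons, e1, e2, e3, e4, Prod.mk.injEq]
      refine ⟨?_, ?_, ?_, ?_⟩ <;> split_ifs <;> first | exact (‹False›).elim | (push_cast; omega) | push_cast
    | succ k' =>
      have htail := ih (j + 1) k' (by simpa using hk)
      simp only [pvNext, List.getD_cons_succ, List.drop_succ_cons, htail, Prod.mk.injEq]
      refine ⟨?_, ?_, ?_, ?_⟩ <;> (split_ifs <;> push_cast <;> omega)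

-- the table at index k (k ≤ n) holds exactly the four findFrom values.
lemma pvNext_getD_zero (cs : List Char) (k : Nat) (hk : k ≤ cs.length) :
    (pvNext cs 0).getD k (-1, -1, -1, -1) =
      (PySem.Chars.findFrom cs ['`'] ↑k, PySem.Chars.findFrom cs ['*', '*'] ↑k,
       PySem.Chars.findFrom cs ['\\', ']'] ↑k, PySem.Chars.findFrom cs [']'] ↑k) := by
  rw [pvNext_getD cs 0 k hk,
      PySem.Chars.findFrom_natCast cs ['`'] k hk,
      PySem.Chars.findFrom_natCast cs ['*', '*'] k hk,
      PySem.Chars.findFrom_natCast cs ['\\', ']'] k hk,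
      PySem.Chars.findFrom_natCast cs [']'] k hk]
  simp

lemma pvGoB_eq_pvGoA (cs : List Char) :
    ∀ fuel i, pvGoB cs (pvNext cs 0) fuel i = pvGoA cs fuel i := by
  intro fuel
  induction fuel with
  | zero => intro i; rfl
  | succ fuel ih =>
    intro i
    rw [pvGoB, pvGoA]
    by_cases hi : i < cs.length
    · simp only [dif_pos hi]
      have h1 : i + 1 ≤ cs.length := hi
      have l1 := pvNext_getD_zero cs (i + 1) h1
      by_cases c2a : PySem.Chars.slice cs (some ↑i) (some ↑(i + 2)) = ['*', '*']
      · have h2 : i + 2 ≤ cs.length := by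
          have hlen := congrArg List.length c2a
          rw [PySem.Chars.slice_eq_listSlice, PySem.List.slice_natCast] at hlen
          simp at hlen; omega
        have l2 := pvNext_getD_zero cs (i + 2) h2
        simp only [l1, l2]
        split_ifs <;> simp [ih]
      · by_cases c3a : PySem.Chars.slice cs (some ↑i) (some ↑(i + 2)) = ['\\', '[']
        · have h2 : i + 2 ≤ cs.length := by
            have hlen := congrArg List.length c3a
            rw [PySem.Chars.slice_eq_listSlice, PySem.List.slice_natCast] at hlen
            simp at hlen; omega
          have l2 := pvNext_getD_zero cs (i + 2) h2
          simp only [l1, l2]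
          split_ifs <;> simp [ih]
        · simp only [l1]
          have nb2 : ¬(PySem.Chars.slice cs (some ↑i) (some ↑(i + 2)) = ['*', '*'] ∧
              ((pvNext cs 0).getD (i + 2) (-1, -1, -1, -1)).2.1 ≠ -1) := fun h => c2a h.1
          have na2 : ¬(PySem.Chars.slice cs (some ↑i) (some ↑(i + 2)) = ['*', '*'] ∧
              PySem.Chars.findFrom cs ['*', '*'] ↑(i + 2) ≠ -1) := fun h => c2a h.1
          have nb3 : ¬(PySem.Chars.slice cs (some ↑i) (some ↑(i + 2)) = ['\\', '['] ∧
              ((pvNext cs 0).getD (i + 2) (-1, -1, -1, -1)).2.2.1 ≠ -1) := fun h => c3a h.1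
          have na3 : ¬(PySem.Chars.slice cs (some ↑i) (some ↑(i + 2)) = ['\\', '['] ∧
              PySem.Chars.findFrom cs ['\\', ']'] ↑(i + 2) ≠ -1) := fun h => c3a h.1
          rw [if_neg nb2, if_neg na2, if_neg nb3, if_neg na3]
          split_ifs <;> simp [ih]
    · simp only [dif_neg hi]

-- ===== VERDICT (by name: the statement is the Claim_ definition above) =====
theorem render_inline_spec : Claim_equal_render_inline := by
  intro text _
  unfold Spec_render_inline render_inline render_inline_alt
  rw [pvGoB_eq_pvGoA]
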